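-- pv_equiv track=rewrite | github.com/CheckiO-Missions/checkio-mission-shell-game | verification/tests.py | shell_game
-- ===== SOURCE A (Python) =====
-- def shell_game(shell: str, moves: list[int]) -> str:
--
--     table = {x: 0 for x in "ABC"}
--     table[shell] = 1
--     for move in moves:
--         match move:
--             case 1: table["A"], table["B"] = table["B"], table["A"]
--             case 2: table["C"], table["B"] = table["B"], table["C"]
--             case 3: table["A"], table["C"] = table["C"], table["A"]
--
--     return next(x for x in table if table[x])
-- ===== SOURCE B (Python) =====
-- def shell_game(shell: str, moves: list[int]) -> str:
--     pos = shell
--     swaps = {1: ("A", "B"), 2: ("C", "B"), 3: ("A", "C")}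
--     for move in moves:
--         if move in swaps:
--             a, b = swaps[move]
--             if pos == a:
--                 pos = b
--             elif pos == b:
--                 pos = a
--     return pos
-- ===== Notes on version B (the rewrite author's own statement) =====
-- stated objective: simpler
-- what changed: B tracks the shell's current position as a single scalar updated through a swap-pair mapping, instead of maintaining a three-flag table and scanning it for the set flag at the end.
import Mathlib
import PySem

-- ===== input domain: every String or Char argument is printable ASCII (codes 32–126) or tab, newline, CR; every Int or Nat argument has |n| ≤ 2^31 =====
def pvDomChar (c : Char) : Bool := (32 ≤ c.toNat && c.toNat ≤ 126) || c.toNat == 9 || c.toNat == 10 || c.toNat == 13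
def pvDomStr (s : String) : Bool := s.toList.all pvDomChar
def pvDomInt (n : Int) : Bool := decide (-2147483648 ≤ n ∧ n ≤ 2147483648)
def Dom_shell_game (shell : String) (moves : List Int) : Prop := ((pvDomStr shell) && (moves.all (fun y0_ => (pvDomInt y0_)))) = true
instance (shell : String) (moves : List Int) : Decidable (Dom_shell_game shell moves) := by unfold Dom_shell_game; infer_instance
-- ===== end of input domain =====

-- B replaces A's three-flag table (swapped per move, scanned for the set flag at the end)
-- by a single scalar position updated through a swap-pair mapping; same O(n) cost, simpler.

-- ===== PORT A =====
-- loop body of A's for-loop (Python 'match move: case 1/2/3' with simultaneous swap assignment;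
-- table["X"] reads ported as getD _ 0: the keys "A","B","C" are always present)
def stepA (d : PySem.Dict String Int) (move : Int) : PySem.Dict String Int :=
  if move = 1 then
    let vB := d.getD "B" 0; let vA := d.getD "A" 0
    (d.insert "A" vB).insert "B" vA
  else if move = 2 then
    let vB := d.getD "B" 0; let vC := d.getD "C" 0
    (d.insert "C" vB).insert "B" vC
  else if move = 3 then
    let vC := d.getD "C" 0; let vA := d.getD "A" 0
    (d.insert "A" vC).insert "C" vA
  else d

def shell_game (shell : String) (moves : List Int) : String :=
  -- table = {x: 0 for x in "ABC"}
  let table : PySem.Dict String Int :=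
    "ABC".toList.foldl (fun d x => d.insert (String.ofList [x]) 0) PySem.Dict.empty
  -- table[shell] = 1
  let table := table.insert shell 1
  let table := moves.foldl stepA table
  -- next(x for x in table if table[x]); a flag is always 1, so the none case is unreachable
  match table.items.find? (fun p => p.2 != 0) with
  | some p => p.1
  | none => ""

-- ===== PORT B =====
-- swaps = {1: ("A","B"), 2: ("C","B"), 3: ("A","C")}
def swapsB : PySem.Dict Int (String × String) :=
  ((PySem.Dict.empty.insert 1 ("A", "B")).insert 2 ("C", "B")).insert 3 ("A", "C")

-- loop body of B: 'if move in swaps: a, b = swaps[move]; …'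
def stepB (pos : String) (move : Int) : String :=
  match swapsB.get? move with
  | some (a, b) => if pos = a then b else if pos = b then a else pos
  | none => pos

def shell_game_alt (shell : String) (moves : List Int) : String :=
  moves.foldl stepB shell

-- ===== PRECONDITION & SPEC =====
def Spec_shell_game (shell : String) (moves : List Int) (out : String) : Prop := out = shell_game_alt shell moves
instance (shell : String) (moves : List Int) (out : String) : Decidable (Spec_shell_game shell moves out) := by unfold Spec_shell_game; infer_instance

-- ===== CLAIM (what is proved, stated in full; the proofs are below) =====
def Claim_equal_shell_game : Prop := ∀ (shell : String) (moves : List Int), Dom_shell_game shell moves → Spec_shell_game shell moves (shell_game shell moves)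

-- ===== LEMMAS AND PROOFS =====

-- A's flag table as a function of the tracked position (for shell ∈ {"A","B","C"})
def flags (pos : String) : PySem.Dict String Int :=
  PySem.Dict.mk [("A", if pos = "A" then (1:Int) else 0),
                 ("B", if pos = "B" then 1 else 0),
                 ("C", if pos = "C" then 1 else 0)]

theorem get?_swapsB (move : Int) :
    swapsB.get? move =
      if move = 3 then some ("A", "C")
      else if move = 2 then some ("C", "B")
      else if move = 1 then some ("A", "B")
      else none := by
  simp [swapsB, PySem.Dict.get?_insert, PySem.Dict.get?_empty]

theorem stepB_mem (move : Int) (pos : String)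
    (h : pos = "A" ∨ pos = "B" ∨ pos = "C") :
    stepB pos move = "A" ∨ stepB pos move = "B" ∨ stepB pos move = "C" := by
  unfold stepB
  rw [get?_swapsB]
  rcases h with rfl | rfl | rfl <;>
    by_cases h3 : move = 3 <;> by_cases h2 : move = 2 <;> by_cases h1 : move = 1 <;>
      simp [h1, h2, h3]

theorem stepA_flags (move : Int) (pos : String)
    (h : pos = "A" ∨ pos = "B" ∨ pos = "C") :
    stepA (flags pos) move = flags (stepB pos move) := by
  unfold stepA stepB
  rw [get?_swapsB]
  rcases h with rfl | rfl | rfl <;>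
    by_cases h3 : move = 3 <;> by_cases h2 : move = 2 <;> by_cases h1 : move = 1 <;>
      simp [h1, h2, h3] <;> decide

theorem foldl_stepA_flags (moves : List Int) :
    ∀ pos, (pos = "A" ∨ pos = "B" ∨ pos = "C") →
      moves.foldl stepA (flags pos) = flags (moves.foldl stepB pos) := by
  induction moves with
  | nil => intro pos _; rfl
  | cons m ms ih =>
      intro pos h
      simp only [List.foldl_cons]
      rw [stepA_flags m pos h]
      exact ih _ (stepB_mem m pos h)

theorem find_flags (pos : String) (h : pos = "A" ∨ pos = "B" ∨ pos = "C") :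
    (flags pos).items.find? (fun p => p.2 != 0) = some (pos, 1) := by
  rcases h with rfl | rfl | rfl <;> decide

-- base table {A:0, B:0, C:0}
theorem base_table :
    ("ABC".toList.foldl (fun d x => d.insert (String.ofList [x]) 0) PySem.Dict.empty)
      = PySem.Dict.mk [("A", (0:Int)), ("B", 0), ("C", 0)] := by decide

theorem init_outside (shell : String)
    (hA : shell ≠ "A") (hB : shell ≠ "B") (hC : shell ≠ "C") :
    (PySem.Dict.mk [("A", (0:Int)), ("B", 0), ("C", 0)]).insert shell 1
      = PySem.Dict.mk [("A", 0), ("B", 0), ("C", 0), (shell, 1)] := by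
  apply PySem.Dict.ext
  rw [PySem.Dict.items_insert_of_not_contains]
  · rfl
  · simp [PySem.Dict.contains_mk]
    exact ⟨fun e => hA e.symm, fun e => hB e.symm, fun e => hC e.symm⟩

theorem stepA_outside (shell : String) (move : Int)
    (hA : shell ≠ "A") (hB : shell ≠ "B") (hC : shell ≠ "C") :
    stepA (PySem.Dict.mk [("A", 0), ("B", 0), ("C", 0), (shell, 1)]) move
      = PySem.Dict.mk [("A", 0), ("B", 0), ("C", 0), (shell, 1)] := by
  unfold stepA
  split_ifs <;>
    · apply PySem.Dict.ext
      simp [PySem.Dict.getD_eq_get?_getD, PySem.Dict.get?_mk_cons,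
            PySem.Dict.items_insert, PySem.Dict.contains_insert, PySem.Dict.contains_mk,
            hA, hB, hC]

theorem stepB_outside (shell : String) (move : Int)
    (hA : shell ≠ "A") (hB : shell ≠ "B") (hC : shell ≠ "C") :
    stepB shell move = shell := by
  unfold stepB
  rw [get?_swapsB]
  split_ifs <;> simp [hA, hB, hC]

theorem foldl_const {α β : Type} (f : α → β → α) (b : α) (l : List β)
    (h : ∀ x, f b x = b) : l.foldl f b = b := by
  induction l with
  | nil => rfl
  | cons x xs ih => simp [List.foldl_cons, h x, ih]

theorem foldl_stepB_mem (moves : List Int) :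
    ∀ pos, (pos = "A" ∨ pos = "B" ∨ pos = "C") →
      (moves.foldl stepB pos = "A" ∨ moves.foldl stepB pos = "B" ∨ moves.foldl stepB pos = "C") := by
  induction moves with
  | nil => intro pos h; exact h
  | cons m ms ih => intro pos h; exact ih _ (stepB_mem m pos h)

-- ===== VERDICT (by name: the statement is the Claim_ definition above) =====
theorem shell_game_spec : Claim_equal_shell_game := by
  intro shell moves _
  unfold Spec_shell_game
  simp only [shell_game, shell_game_alt]
  rw [base_table]
  by_cases hmem : shell = "A" ∨ shell = "B" ∨ shell = "C"
  · have hinit : (PySem.Dict.mk [("A", (0:Int)), ("B", 0), ("C", 0)]).insert shell 1 = flags shell := by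
      rcases hmem with rfl | rfl | rfl <;> decide
    rw [hinit, foldl_stepA_flags moves shell hmem]
    rw [find_flags _ (foldl_stepB_mem moves shell hmem)]
  · push Not at hmem
    obtain ⟨hA, hB, hC⟩ := hmem
    rw [init_outside shell hA hB hC,
        foldl_const stepA _ moves (fun m => stepA_outside shell m hA hB hC),
        foldl_const stepB shell moves (fun m => stepB_outside shell m hA hB hC)]
    simp [List.find?]
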